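-- pv_equiv track=rewrite | github.com/AndreyQuicenoC/CLP-RCLP_Minizinc_Lab_Enviroment | scripts/verification/verify_dzn_correctness.py | verify_stations_padding
-- ===== SOURCE A (Python) =====
-- from typing import List, Dict, Tuple
--
-- def verify_stations_padding(dzn_st_bi: List[List[int]], bus_idx: int,
--                            json_stations: List[int], max_stops: int) -> Tuple[bool, List[str]]:
--     """Verify station sequence and padding for a bus."""
--     errors = []
--
--     dzn_row = dzn_st_bi[bus_idx]
--     json_len = len(json_stations)
--
--     # Check actual stations
--     for i in range(json_len):
--         if i < len(dzn_row):
--             if dzn_row[i] != json_stations[i]: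
--                 errors.append(
--                     f"Bus {bus_idx}, Stop {i}: Expected {json_stations[i]}, got {dzn_row[i]}"
--                 )
--
--     # Check padding (should be last station repeated)
--     if json_len > 0:
--         last_station = json_stations[-1]
--         for i in range(json_len, max_stops):
--             if i < len(dzn_row):
--                 if dzn_row[i] != last_station:
--                     errors.append(
--                         f"Bus {bus_idx}, Padding position {i}: Expected {last_station} (last), got {dzn_row[i]}"
--                     )
--
--     return len(errors) == 0, errors
-- ===== SOURCE B (Python) =====
-- def verify_stations_padding(dzn_st_bi, bus_idx, json_stations, max_stops):
--     """Verify station sequence and padding for a bus (table + single merged pass)."""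
--     dzn_row = dzn_st_bi[bus_idx]
--     json_len = len(json_stations)
--     expected = list(json_stations)
--     if json_len > 0:
--         expected += [json_stations[-1]] * (max_stops - json_len)
--     errors = []
--     for i in range(len(expected)):
--         if i < len(dzn_row) and dzn_row[i] != expected[i]:
--             if i < json_len:
--                 errors.append(
--                     f"Bus {bus_idx}, Stop {i}: Expected {expected[i]}, got {dzn_row[i]}"
--                 )
--             else:
--                 errors.append(
--                     f"Bus {bus_idx}, Padding position {i}: Expected {expected[i]} (last), got {dzn_row[i]}"
--                 )
--     return len(errors) == 0, errors
-- ===== Notes on version B (the rewrite author's own statement) =====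
-- stated objective: alternative
-- what changed: B precomputes the full expected row (stations plus last-station padding, with a negative multiplier naturally yielding no padding) and emits all errors in one merged index loop choosing the message format by position, instead of A's two separate guarded range loops.
import Mathlib
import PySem

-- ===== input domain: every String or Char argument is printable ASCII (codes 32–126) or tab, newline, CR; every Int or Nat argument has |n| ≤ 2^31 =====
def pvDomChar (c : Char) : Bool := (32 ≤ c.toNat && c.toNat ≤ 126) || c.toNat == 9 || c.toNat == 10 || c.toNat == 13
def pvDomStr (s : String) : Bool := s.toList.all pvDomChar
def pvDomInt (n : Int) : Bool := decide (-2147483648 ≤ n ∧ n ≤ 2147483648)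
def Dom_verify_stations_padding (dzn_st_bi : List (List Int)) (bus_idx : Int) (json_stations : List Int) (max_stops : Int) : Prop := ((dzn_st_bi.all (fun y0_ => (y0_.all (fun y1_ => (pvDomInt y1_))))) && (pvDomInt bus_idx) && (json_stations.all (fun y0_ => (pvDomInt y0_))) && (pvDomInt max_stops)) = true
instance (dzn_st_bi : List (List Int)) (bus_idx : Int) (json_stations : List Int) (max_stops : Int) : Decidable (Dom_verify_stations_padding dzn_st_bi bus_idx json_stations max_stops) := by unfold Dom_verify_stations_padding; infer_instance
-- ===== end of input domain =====

-- B builds the expected full row once and merges A's two guarded loops into one pass; alternative decomposition, same cost.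

-- shared f-string formatting (identical literal text in both Pythons)
def pvMsgStop (bus i exp got : Int) : String :=
  "Bus " ++ PySem.Int.toStr bus ++ ", Stop " ++ PySem.Int.toStr i ++ ": Expected " ++
    PySem.Int.toStr exp ++ ", got " ++ PySem.Int.toStr got

def pvMsgPad (bus i exp got : Int) : String :=
  "Bus " ++ PySem.Int.toStr bus ++ ", Padding position " ++ PySem.Int.toStr i ++ ": Expected " ++
    PySem.Int.toStr exp ++ " (last), got " ++ PySem.Int.toStr got

-- ===== PORT A =====
def verify_stations_padding (dzn_st_bi : List (List Int)) (bus_idx : Int) (json_stations : List Int) (max_stops : Int) : Bool × List String :=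
  let dzn_row := PySem.List.pyGetD dzn_st_bi bus_idx []   -- dzn_st_bi[bus_idx]; exact under Pre_
  let json_len : Int := json_stations.length
  let errors1 := (PySem.List.pyRange 0 json_len 1).foldl (fun errs i =>
      if i < (dzn_row.length : Int) then
        if PySem.List.pyGetD dzn_row i 0 ≠ PySem.List.pyGetD json_stations i 0 then
          errs ++ [pvMsgStop bus_idx i (PySem.List.pyGetD json_stations i 0) (PySem.List.pyGetD dzn_row i 0)]
        else errs
      else errs) []
  let errors :=
    if json_len > 0 then
      let last_station := PySem.List.pyGetD json_stations (-1) 0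
      (PySem.List.pyRange json_len max_stops 1).foldl (fun errs i =>
        if i < (dzn_row.length : Int) then
          if PySem.List.pyGetD dzn_row i 0 ≠ last_station then
            errs ++ [pvMsgPad bus_idx i last_station (PySem.List.pyGetD dzn_row i 0)]
          else errs
        else errs) errors1
    else errors1
  (errors.length == 0, errors)

-- ===== PORT B =====
def verify_stations_padding_alt (dzn_st_bi : List (List Int)) (bus_idx : Int) (json_stations : List Int) (max_stops : Int) : Bool × List String :=
  let dzn_row := PySem.List.pyGetD dzn_st_bi bus_idx []   -- dzn_st_bi[bus_idx]; exact under Pre_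
  let json_len : Int := json_stations.length
  let expected := json_stations ++
    (if json_len > 0 then
      List.replicate (max_stops - json_len).toNat (PySem.List.pyGetD json_stations (-1) 0)
     else [])
  let errors := (PySem.List.pyRange 0 (expected.length : Int) 1).foldl (fun errs i =>
      if i < (dzn_row.length : Int) ∧ PySem.List.pyGetD dzn_row i 0 ≠ PySem.List.pyGetD expected i 0 then
        errs ++ [if i < json_len then
                   pvMsgStop bus_idx i (PySem.List.pyGetD expected i 0) (PySem.List.pyGetD dzn_row i 0)
                 else
                   pvMsgPad bus_idx i (PySem.List.pyGetD expected i 0) (PySem.List.pyGetD dzn_row i 0)]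
      else errs) []
  (errors.length == 0, errors)

-- ===== PRECONDITION & SPEC =====
-- Pre_ excludes exactly the inputs where Python A raises IndexError on dzn_st_bi[bus_idx].
def Pre_verify_stations_padding (dzn_st_bi : List (List Int)) (bus_idx : Int) (json_stations : List Int) (max_stops : Int) : Prop :=
  PySem.Raise.InRange dzn_st_bi.length bus_idx
instance (dzn_st_bi : List (List Int)) (bus_idx : Int) (json_stations : List Int) (max_stops : Int) : Decidable (Pre_verify_stations_padding dzn_st_bi bus_idx json_stations max_stops) := by unfold Pre_verify_stations_padding; infer_instance

def pvWitness_verify_stations_padding : List (List Int) × Int × List Int × Int := ([[1, 2, 2]], 0, [1, 3], 3)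

def Spec_verify_stations_padding (dzn_st_bi : List (List Int)) (bus_idx : Int) (json_stations : List Int) (max_stops : Int) (out : Bool × List String) : Prop := out = verify_stations_padding_alt dzn_st_bi bus_idx json_stations max_stops
instance (dzn_st_bi : List (List Int)) (bus_idx : Int) (json_stations : List Int) (max_stops : Int) (out : Bool × List String) : Decidable (Spec_verify_stations_padding dzn_st_bi bus_idx json_stations max_stops out) := by unfold Spec_verify_stations_padding; infer_instance

-- ===== CLAIM (what is proved, stated in full; the proofs are below) =====
def Claim_equal_verify_stations_padding : Prop := ∀ (dzn_st_bi : List (List Int)) (bus_idx : Int) (json_stations : List Int) (max_stops : Int), Dom_verify_stations_padding dzn_st_bi bus_idx json_stations max_stops → Pre_verify_stations_padding dzn_st_bi bus_idx json_stations max_stops → Spec_verify_stations_padding dzn_st_bi bus_idx json_stations max_stops (verify_stations_padding dzn_st_bi bus_idx json_stations max_stops)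

-- ===== LEMMAS AND PROOFS =====

theorem pvGetD_append_left (a b : List Int) (i : Int) (h0 : 0 ≤ i) (h1 : i < (a.length : Int)) :
    PySem.List.pyGetD (a ++ b) i 0 = PySem.List.pyGetD a i 0 := by
  rw [PySem.List.pyGetD_eq_getElem (a ++ b) 0 h0 (by simp; omega),
      PySem.List.pyGetD_eq_getElem a 0 h0 (by exact_mod_cast h1)]
  exact List.getElem_append_left (by omega)

theorem pvGetD_append_replicate (a : List Int) (x : Int) (P : Nat) (i : Int)
    (h0 : (a.length : Int) ≤ i) (h1 : i < (a.length : Int) + P) :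
    PySem.List.pyGetD (a ++ List.replicate P x) i 0 = x := by
  have hge : (0:Int) ≤ i := le_trans (by positivity) h0
  rw [PySem.List.pyGetD_eq_getElem (a ++ List.replicate P x) 0 hge (by simp; omega)]
  rw [List.getElem_append_right (by omega)]
  simp

-- ===== VERDICT =====
theorem verify_stations_padding_spec : Claim_equal_verify_stations_padding := by
  intro dzn bus js M _ _
  unfold Spec_verify_stations_padding
  simp only [verify_stations_padding, verify_stations_padding_alt]
  generalize PySem.List.pyGetD dzn bus [] = r
  rcases eq_or_ne js [] with hjs | hjs
  · subst hjs
    simp [PySem.List.pyRange_one_eq_nil]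
  · have hL0 : 0 < js.length := List.length_pos_iff.mpr hjs
    have hLpos : (0:Int) < (js.length : Int) := by exact_mod_cast hL0
    rw [if_pos hLpos, if_pos hLpos]
    refine congrArg (fun l : List String => ((l.length == 0 : Bool), l)) ?_
    set last := PySem.List.pyGetD js (-1) 0 with hlast
    set P : Nat := (M - (js.length : Int)).toNat with hP
    clear_value P last
    have hexplen : ((js ++ List.replicate P last).length : Int) = (js.length : Int) + (P : Int) := by
      simp
    rw [hexplen,
        PySem.List.pyRange_one_append 0 (js.length : Int) ((js.length : Int) + (P:Int)) (by omega) (by omega),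
        List.foldl_append]
    -- first segment of B's merged loop equals A's station loop
    have seg1 : (PySem.List.pyRange 0 (js.length : Int) 1).foldl
        (fun errs i =>
          if i < (r.length : Int) ∧ PySem.List.pyGetD r i 0 ≠ PySem.List.pyGetD (js ++ List.replicate P last) i 0 then
            errs ++ [if i < (js.length : Int) then
                       pvMsgStop bus i (PySem.List.pyGetD (js ++ List.replicate P last) i 0) (PySem.List.pyGetD r i 0)
                     else
                       pvMsgPad bus i (PySem.List.pyGetD (js ++ List.replicate P last) i 0) (PySem.List.pyGetD r i 0)]
          else errs) []
        = (PySem.List.pyRange 0 (js.length : Int) 1).foldl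
        (fun errs i =>
          if i < (r.length : Int) then
            if PySem.List.pyGetD r i 0 ≠ PySem.List.pyGetD js i 0 then
              errs ++ [pvMsgStop bus i (PySem.List.pyGetD js i 0) (PySem.List.pyGetD r i 0)]
            else errs
          else errs) [] := by
      refine PySem.List.foldl_congr_mem _ _ _ _ (fun acc i hi => ?_)
      rw [PySem.List.mem_pyRange_one] at hi
      rw [pvGetD_append_left js _ i hi.1 hi.2, if_pos hi.2]
      split_ifs <;> first | rfl | omega
    rw [seg1]
    -- second segment of B's merged loop equals A's padding loop
    by_cases hML : M ≤ (js.length : Int)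
    · have hP0 : P = 0 := by omega
      rw [hP0]
      simp [PySem.List.pyRange_one_eq_nil (by omega : M ≤ (js.length : Int))]
    · have hPM : (js.length : Int) + (P : Int) = M := by omega
      rw [hPM]
      refine PySem.List.foldl_congr_mem _ _ _ _ (fun acc i hi => ?_)
      rw [PySem.List.mem_pyRange_one] at hi
      obtain ⟨hi1, hi2⟩ := hi
      have hb : i < (js.length : Int) + (P : Int) := by omega
      have hnl : ¬ i < (js.length : Int) := by omega
      rw [pvGetD_append_replicate js last P i hi1 hb, if_neg hnl]
      split_ifs <;> first | rfl | omega
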